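-- pv_equiv track=rewrite | github.com/gotpist1/aoc-2025 | utils/column_parser.py | convert_problems_to_numbers_and_operator_tuple
-- ===== SOURCE A (Python) =====
-- def convert_problems_to_numbers_and_operator_tuple(problems):
--     result = []
--     for problem in problems:
--         numbers = []
--         operator = None
--
--         for column in problem:
--             digits = []
--             for char in column:
--                 if char.isdigit():
--                     digits.append(char)
--                 elif char in '*+':
--                     operator = char
--             if digits:
--                 number = int(''.join(digits))
--                 numbers.append(number)
--
--         result.append((numbers, operator))
--
--     return result
-- ===== SOURCE B (Python) =====
-- def convert_problems_to_numbers_and_operator_tuple(problems):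
--     result = []
--     for problem in problems:
--         # pass 1: the operator is the last '*' or '+' character anywhere in the problem
--         ops = [c for column in problem for c in column if c in '*+']
--         operator = ops[-1] if ops else None
--         # pass 2: each column with at least one digit contributes the int of its digits
--         numbers = [int(''.join(c for c in column if c.isdigit()))
--                    for column in problem if any(c.isdigit() for c in column)]
--         result.append((numbers, operator))
--     return result
-- ===== Notes on version B (the rewrite author's own statement) =====
-- stated objective: alternative
-- what changed: Replaces A's single interleaved char loop threading (digits, operator) state across columns with two independent passes per problem: one comprehension collecting all operator characters (last one wins), one comprehension mapping digit-bearing columns to their int values.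
import Mathlib
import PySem

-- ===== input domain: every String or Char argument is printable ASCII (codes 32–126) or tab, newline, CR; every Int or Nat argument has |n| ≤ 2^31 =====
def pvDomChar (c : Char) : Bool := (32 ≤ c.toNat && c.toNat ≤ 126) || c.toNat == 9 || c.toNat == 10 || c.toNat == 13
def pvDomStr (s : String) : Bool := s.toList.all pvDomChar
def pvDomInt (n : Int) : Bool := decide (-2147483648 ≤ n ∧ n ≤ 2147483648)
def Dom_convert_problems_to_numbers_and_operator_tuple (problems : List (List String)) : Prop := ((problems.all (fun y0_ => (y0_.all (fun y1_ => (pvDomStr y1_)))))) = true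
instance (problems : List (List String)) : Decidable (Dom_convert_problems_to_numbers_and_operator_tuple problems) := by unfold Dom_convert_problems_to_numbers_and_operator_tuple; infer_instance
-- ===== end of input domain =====

-- B replaces A's single interleaved char loop (threading digits+operator state) with two
-- independent passes per problem: collect operator chars (last wins) and map digit-bearing
-- columns to their int values; alternative decomposition, same cost.


-- ===== PORT A =====
-- inner char loop: state = (digits collected so far, current operator)
def pvAChar (st : List Char × Option String) (c : Char) : List Char × Option String :=
  if PySem.Chars.isdigit c then (st.1 ++ [c], st.2)
  else if c = '*' ∨ c = '+' then (st.1, some (String.ofList [c]))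
  else st

-- column loop: state = (numbers so far, current operator)
def pvACol (st : List Int × Option String) (column : String) : List Int × Option String :=
  let inner := column.toList.foldl pvAChar ([], st.2)
  if inner.1 ≠ [] then (st.1 ++ [(PySem.Int.ofChars? inner.1).getD 0], inner.2)
  else (st.1, inner.2)

def convert_problems_to_numbers_and_operator_tuple (problems : List (List String)) : List (List Int × Option String) :=
  problems.foldl (fun result problem => result ++ [problem.foldl pvACol ([], none)]) []

-- ===== PORT B =====
-- pass 1: all operator characters of the problem, in order
def pvBOps (problem : List String) : List Char :=
  problem.flatMap (fun column => column.toList.filter (fun c => decide (c = '*' ∨ c = '+')))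

-- pass 2: each digit-bearing column contributes the int of its digit characters
def pvBNumbers (problem : List String) : List Int :=
  problem.filterMap (fun column =>
    let ds := column.toList.filter PySem.Chars.isdigit
    if ds.isEmpty then none else some ((PySem.Int.ofChars? ds).getD 0))

def convert_problems_to_numbers_and_operator_tuple_alt (problems : List (List String)) : List (List Int × Option String) :=
  problems.map (fun problem =>
    (pvBNumbers problem, (pvBOps problem).getLast?.map (fun c => String.ofList [c])))

-- ===== PRECONDITION & SPEC =====
def Spec_convert_problems_to_numbers_and_operator_tuple (problems : List (List String)) (out : List (List Int × Option String)) : Prop := out = convert_problems_to_numbers_and_operator_tuple_alt problems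
instance (problems : List (List String)) (out : List (List Int × Option String)) : Decidable (Spec_convert_problems_to_numbers_and_operator_tuple problems out) := by unfold Spec_convert_problems_to_numbers_and_operator_tuple; infer_instance

-- ===== CLAIM (what is proved, stated in full; the proofs are below) =====
def Claim_equal_convert_problems_to_numbers_and_operator_tuple : Prop := ∀ (problems : List (List String)), Dom_convert_problems_to_numbers_and_operator_tuple problems → Spec_convert_problems_to_numbers_and_operator_tuple problems (convert_problems_to_numbers_and_operator_tuple problems)

-- ===== LEMMAS AND PROOFS =====
-- the char loop computes (digits ++ filtered digit chars, last operator char of the column orelse incoming)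
lemma pvAChar_foldl (cs : List Char) (ds : List Char) (o : Option String) :
    cs.foldl pvAChar (ds, o) =
      (ds ++ cs.filter PySem.Chars.isdigit,
       ((cs.filter (fun c => decide (c = '*' ∨ c = '+'))).getLast?.map (fun c => String.ofList [c])).or o) := by
  induction cs generalizing ds o with
  | nil => simp
  | cons c cs ih =>
    have hd : ¬ (PySem.Chars.isdigit c = true ∧ (c = '*' ∨ c = '+')) := by
      rintro ⟨h1, h2 | h2⟩ <;> subst h2 <;> simp [PySem.Chars.isdigit] at h1
    simp only [List.foldl_cons, pvAChar]
    by_cases h1 : PySem.Chars.isdigit c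
    · rw [if_pos h1, ih,
         List.filter_cons_of_pos h1,
         List.filter_cons_of_neg (by simpa using fun h2 => hd ⟨h1, h2⟩)]
      simp
    · by_cases h2 : c = '*' ∨ c = '+'
      · rw [if_neg (by simp [h1]), if_pos h2, ih,
           List.filter_cons_of_neg (by simpa using h1),
           List.filter_cons_of_pos (by simpa using h2),
           show c :: cs.filter (fun c => decide (c = '*' ∨ c = '+'))
              = [c] ++ cs.filter (fun c => decide (c = '*' ∨ c = '+')) from rfl,
           List.getLast?_append]
        rcases (cs.filter (fun c => decide (c = '*' ∨ c = '+'))).getLast? with _ | c' <;> simp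
      · rw [if_neg (by simp [h1]), if_neg h2, ih,
           List.filter_cons_of_neg (by simpa using h1),
           List.filter_cons_of_neg (by simpa using h2)]

-- the column loop computes (numbers ++ B's numbers, last operator of the problem orelse incoming)
lemma pvACol_foldl (problem : List String) (ns : List Int) (o : Option String) :
    problem.foldl pvACol (ns, o) =
      (ns ++ pvBNumbers problem,
       ((pvBOps problem).getLast?.map (fun c => String.ofList [c])).or o) := by
  induction problem generalizing ns o with
  | nil => simp [pvBNumbers, pvBOps]
  | cons col cols ih =>
    simp only [List.foldl_cons, pvACol, pvAChar_foldl, List.nil_append]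
    simp only [pvBNumbers, pvBOps, List.filterMap_cons, List.flatMap_cons] at ih ⊢
    by_cases hds : (col.toList.filter PySem.Chars.isdigit).isEmpty
    · rw [if_neg (by simpa [List.isEmpty_iff] using hds), if_pos hds, ih,
         List.getLast?_append, Option.map_or, Option.or_assoc]
    · rw [if_pos (by simpa [List.isEmpty_iff] using hds), if_neg hds, ih,
         List.getLast?_append, Option.map_or, Option.or_assoc, List.append_assoc]
      rfl

-- ===== VERDICT (by name: the statement is the Claim_ definition above) =====
theorem convert_problems_to_numbers_and_operator_tuple_spec : Claim_equal_convert_problems_to_numbers_and_operator_tuple := by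
  intro problems _
  unfold Spec_convert_problems_to_numbers_and_operator_tuple
  unfold convert_problems_to_numbers_and_operator_tuple convert_problems_to_numbers_and_operator_tuple_alt
  rw [PySem.List.foldl_append_singleton_eq_map]
  refine List.map_congr_left fun problem _ => ?_
  rw [pvACol_foldl]
  rcases (pvBOps problem).getLast? with _ | c <;> simp
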